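-- pv_equiv track=rewrite | github.com/blacksoxx/vmware-migration-agent | providers/aws/sizing_table.py | _select_vcpu_bucket
-- ===== SOURCE A (Python) =====
-- _AWS_SIZING_TABLE: dict[int, list[tuple[int, str]]] = {
--     1: [
--         (1024, "t3.micro"),
--         (2048, "t3.small"),
--     ],
--     2: [
--         (4096, "t3.medium"),
--         (8192, "t3.large"),
--         (16384, "m5.large"),
--     ],
--     4: [
--         (8192, "m5.xlarge"),
--         (16384, "m5.xlarge"),
--         (32768, "m5.2xlarge"),
--     ],
--     8: [
--         (16384, "m5.2xlarge"),
--         (32768, "m5.2xlarge"),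
--         (65536, "m5.4xlarge"),
--     ],
--     16: [
--         (32768, "m5.4xlarge"),
--         (65536, "m5.4xlarge"),
--         (131072, "m5.8xlarge"),
--     ],
-- }
--
-- def _select_vcpu_bucket(requested_vcpus: int) -> int:
--     if requested_vcpus in _AWS_SIZING_TABLE:
--         return requested_vcpus
--
--     available = sorted(_AWS_SIZING_TABLE)
--
--     # Prefer the next larger vCPU bucket; fallback to the largest available bucket.
--     for candidate in available:
--         if candidate >= requested_vcpus:
--             return candidate
--
--     return available[-1]
-- ===== SOURCE B (Python) =====
-- _AWS_SIZING_TABLE: dict[int, list[tuple[int, str]]] = {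
--     1: [
--         (1024, "t3.micro"),
--         (2048, "t3.small"),
--     ],
--     2: [
--         (4096, "t3.medium"),
--         (8192, "t3.large"),
--         (16384, "m5.large"),
--     ],
--     4: [
--         (8192, "m5.xlarge"),
--         (16384, "m5.xlarge"),
--         (32768, "m5.2xlarge"),
--     ],
--     8: [
--         (16384, "m5.2xlarge"),
--         (32768, "m5.2xlarge"),
--         (65536, "m5.4xlarge"),
--     ],
--     16: [
--         (32768, "m5.4xlarge"),
--         (65536, "m5.4xlarge"),
--         (131072, "m5.8xlarge"),
--     ],
-- }
--
--
-- def _select_vcpu_bucket(requested_vcpus: int) -> int: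
--     # Binary search (bisect_left by hand) for the smallest bucket >= requested;
--     # an exact match lands on itself, so no separate membership guard is needed.
--     available = sorted(_AWS_SIZING_TABLE)
--     lo, hi = 0, len(available)
--     while lo < hi:
--         mid = (lo + hi) // 2
--         if available[mid] < requested_vcpus:
--             lo = mid + 1
--         else:
--             hi = mid
--     return available[lo] if lo < len(available) else available[-1]
-- ===== Notes on version B (the rewrite author's own statement) =====
-- stated objective: idiomatic
-- what changed: Replaced the membership guard plus linear forward scan over the sorted keys with a single hand-rolled bisect_left binary search on the sorted key list (exact matches fall out of the same lookup).
import Mathlib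
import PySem

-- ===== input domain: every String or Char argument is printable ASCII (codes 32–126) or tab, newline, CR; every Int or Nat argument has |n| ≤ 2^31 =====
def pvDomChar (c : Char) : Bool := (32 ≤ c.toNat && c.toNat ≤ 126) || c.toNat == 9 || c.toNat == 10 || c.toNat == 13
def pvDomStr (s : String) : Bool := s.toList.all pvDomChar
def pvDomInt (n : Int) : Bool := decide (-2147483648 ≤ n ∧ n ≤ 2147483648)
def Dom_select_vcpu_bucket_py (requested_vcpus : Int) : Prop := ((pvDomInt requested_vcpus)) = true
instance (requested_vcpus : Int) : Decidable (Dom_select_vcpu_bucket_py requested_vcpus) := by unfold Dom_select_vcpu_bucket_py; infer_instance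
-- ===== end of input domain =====

-- B replaces A's membership guard + linear forward scan with a single hand-written bisect_left binary search on the sorted keys (idiomatic; same behaviour).

-- ===== PORT A =====
-- the module constant _AWS_SIZING_TABLE (dict → association list in insertion order)
def pvAwsSizingTable : PySem.Dict Int (List (Int × String)) :=
  PySem.Dict.ofList
  [ (1, [(1024, "t3.micro"), (2048, "t3.small")])
  , (2, [(4096, "t3.medium"), (8192, "t3.large"), (16384, "m5.large")])
  , (4, [(8192, "m5.xlarge"), (16384, "m5.xlarge"), (32768, "m5.2xlarge")])
  , (8, [(16384, "m5.2xlarge"), (32768, "m5.2xlarge"), (65536, "m5.4xlarge")])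
  , (16, [(32768, "m5.4xlarge"), (65536, "m5.4xlarge"), (131072, "m5.8xlarge")]) ]

-- 'for candidate in available: if candidate >= requested_vcpus: return candidate' as structural recursion
def pvScanA (avail : List Int) (r : Int) : Option Int :=
  match avail with
  | [] => none
  | c :: rest => if c ≥ r then some c else pvScanA rest r

def select_vcpu_bucket_py (requested_vcpus : Int) : Int :=
  if (pvAwsSizingTable.get? requested_vcpus).isSome then requested_vcpus
  else
    let available := PySem.List.sorted (pvAwsSizingTable.keys) (fun x => x) false
    match pvScanA available requested_vcpus with
    | some c => c
    | none => (PySem.List.pyGet? available (-1)).getD 0  -- available[-1]; available is the nonempty constant key list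

-- ===== PORT B =====
-- the while-loop binary search of Source B (lo, hi as Nat indices into the sorted key list)
-- fuel (initially hi - lo, an upper bound on the iteration count) only makes the loop total; it is never exhausted
def pvBisectB (avail : List Int) (r : Int) : Nat → Nat → Nat → Nat
  | 0, lo, _ => lo
  | fuel + 1, lo, hi =>
    if lo < hi then
      let mid := (lo + hi) / 2
      if avail.getD mid 0 < r then pvBisectB avail r fuel (mid + 1) hi
      else pvBisectB avail r fuel lo mid
    else lo

def select_vcpu_bucket_py_alt (requested_vcpus : Int) : Int :=
  let available := PySem.List.sorted (pvAwsSizingTable.keys) (fun x => x) false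
  let lo := pvBisectB available requested_vcpus available.length 0 available.length
  if lo < available.length then available.getD lo 0
  else (PySem.List.pyGet? available (-1)).getD 0

-- ===== PRECONDITION & SPEC =====
def Spec_select_vcpu_bucket_py (requested_vcpus : Int) (out : Int) : Prop := out = select_vcpu_bucket_py_alt requested_vcpus
instance (requested_vcpus : Int) (out : Int) : Decidable (Spec_select_vcpu_bucket_py requested_vcpus out) := by unfold Spec_select_vcpu_bucket_py; infer_instance

-- ===== CLAIM (what is proved, stated in full; the proofs are below) =====
def Claim_equal_select_vcpu_bucket_py : Prop := ∀ (requested_vcpus : Int), Dom_select_vcpu_bucket_py requested_vcpus → Spec_select_vcpu_bucket_py requested_vcpus (select_vcpu_bucket_py requested_vcpus)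

-- ===== LEMMAS AND PROOFS =====

lemma table_mk : pvAwsSizingTable = PySem.Dict.mk
    [ (1, [(1024, "t3.micro"), (2048, "t3.small")])
    , (2, [(4096, "t3.medium"), (8192, "t3.large"), (16384, "m5.large")])
    , (4, [(8192, "m5.xlarge"), (16384, "m5.xlarge"), (32768, "m5.2xlarge")])
    , (8, [(16384, "m5.2xlarge"), (32768, "m5.2xlarge"), (65536, "m5.4xlarge")])
    , (16, [(32768, "m5.4xlarge"), (65536, "m5.4xlarge"), (131072, "m5.8xlarge")]) ] := by decide

lemma sorted_lit : PySem.List.sorted ([1,2,4,8,16] : List Int) (fun x => x) false = [1,2,4,8,16] := by decide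

-- A computes the 5-way step function of the request
lemma portA_eq (r : Int) :
    select_vcpu_bucket_py r =
      if r ≤ 1 then 1 else if r ≤ 2 then 2 else if r ≤ 4 then 4 else if r ≤ 8 then 8 else 16 := by
  simp only [select_vcpu_bucket_py, table_mk, PySem.Dict.keys_mk, PySem.Dict.get?_mk_cons]
  rw [show (List.map Prod.fst [((1:Int), [((1024:Int), "t3.micro"), (2048, "t3.small")]), (2, [(4096, "t3.medium"), (8192, "t3.large"), (16384, "m5.large")]), (4, [(8192, "m5.xlarge"), (16384, "m5.xlarge"), (32768, "m5.2xlarge")]), (8, [(16384, "m5.2xlarge"), (32768, "m5.2xlarge"), (65536, "m5.4xlarge")]), (16, [(32768, "m5.4xlarge"), (65536, "m5.4xlarge"), (131072, "m5.8xlarge")])]) = [1,2,4,8,16] from rfl]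
  rw [sorted_lit]
  simp only [pvScanA, PySem.List.pyGet?]
  split_ifs <;> simp_all [PySem.List.pyIdx?, PySem.Dict.get?]
  all_goals omega

-- the binary search lands on the bisect_left index of r in [1,2,4,8,16]
lemma bisect_eval (r : Int) : pvBisectB [1,2,4,8,16] r 5 0 5 =
    if 16 < r then 5 else if 8 < r then 4 else if 4 < r then 3 else if 2 < r then 2 else if 1 < r then 1 else 0 := by
  by_cases h1 : 1 < r <;> by_cases h2 : 2 < r <;> by_cases h4 : 4 < r <;> by_cases h8 : 8 < r <;> by_cases h16 : 16 < r
  all_goals first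
    | omega
    | simp [pvBisectB, h1, h2, h4, h8, h16]

-- B computes the same 5-way step function
lemma portB_eq (r : Int) :
    select_vcpu_bucket_py_alt r =
      if r ≤ 1 then 1 else if r ≤ 2 then 2 else if r ≤ 4 then 4 else if r ≤ 8 then 8 else 16 := by
  simp only [select_vcpu_bucket_py_alt, table_mk, PySem.Dict.keys_mk]
  rw [show (List.map Prod.fst [((1:Int), [((1024:Int), "t3.micro"), (2048, "t3.small")]), (2, [(4096, "t3.medium"), (8192, "t3.large"), (16384, "m5.large")]), (4, [(8192, "m5.xlarge"), (16384, "m5.xlarge"), (32768, "m5.2xlarge")]), (8, [(16384, "m5.2xlarge"), (32768, "m5.2xlarge"), (65536, "m5.4xlarge")]), (16, [(32768, "m5.4xlarge"), (65536, "m5.4xlarge"), (131072, "m5.8xlarge")])]) = [1,2,4,8,16] from rfl]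
  rw [sorted_lit]
  show (if pvBisectB [1,2,4,8,16] r 5 0 5 < 5 then ([1,2,4,8,16] : List Int).getD (pvBisectB [1,2,4,8,16] r 5 0 5) 0 else (PySem.List.pyGet? [1,2,4,8,16] (-1)).getD 0) = _
  rw [bisect_eval]
  split_ifs <;> simp_all [PySem.List.pyGet?, PySem.List.pyIdx?] <;> omega

-- ===== VERDICT (by name: the statement is the Claim_ definition above) =====
theorem select_vcpu_bucket_py_spec : Claim_equal_select_vcpu_bucket_py := by
  intro r _
  unfold Spec_select_vcpu_bucket_py
  rw [portA_eq, portB_eq]
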